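-- pv_equiv track=rewrite | github.com/tom-clayton/Mopho-Controller | synth_controller/synths/packing_functions.py | mopho_pack
-- ===== SOURCE A (Python) =====
-- def mopho_pack(data):
--     """Pack midi patch dump data from tuple of parameter values as ints.
--     Packing format from page 44 of Manual"""
--     packed_data = []
--
--     for i in range(0, len(data), 7):
--         chunk = data[i: i+7]
--         packing_byte = 0x0
--         data_bytes = []
--         shift = 0x7
--         for byte in chunk:
--             packing_byte |= ((byte & 0x80) >> shift)
--             shift -= 1
--             data_bytes.append(byte & 0x7f)
--
--         packed_data.append(packing_byte)
--         packed_data.extend(data_bytes)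
--
--     return tuple(packed_data)
-- ===== SOURCE B (Python) =====
-- def mopho_pack(data):
--     """Pack midi patch dump data from tuple of parameter values as ints.
--     Packing format from page 44 of Manual"""
--     packed = []
--     pack_pos = 0
--     for i, byte in enumerate(data):
--         if i % 7 == 0:
--             pack_pos = len(packed)
--             packed.append(0)
--         packed[pack_pos] |= ((byte & 0x80) >> 7) << (i % 7)
--         packed.append(byte & 0x7f)
--     return tuple(packed)
-- ===== Notes on version B (the rewrite author's own statement) =====
-- stated objective: alternative
-- what changed: Replaced the nested chunk loop (slice of 7, per-chunk packing byte with a descending shift counter, chunk-local data_bytes list) by a single flat pass over enumerate(data) that appends a 0 placeholder at every 7th index, remembers its position, and ORs (byte>>7)<<(i%7) into it in place.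
import Mathlib
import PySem

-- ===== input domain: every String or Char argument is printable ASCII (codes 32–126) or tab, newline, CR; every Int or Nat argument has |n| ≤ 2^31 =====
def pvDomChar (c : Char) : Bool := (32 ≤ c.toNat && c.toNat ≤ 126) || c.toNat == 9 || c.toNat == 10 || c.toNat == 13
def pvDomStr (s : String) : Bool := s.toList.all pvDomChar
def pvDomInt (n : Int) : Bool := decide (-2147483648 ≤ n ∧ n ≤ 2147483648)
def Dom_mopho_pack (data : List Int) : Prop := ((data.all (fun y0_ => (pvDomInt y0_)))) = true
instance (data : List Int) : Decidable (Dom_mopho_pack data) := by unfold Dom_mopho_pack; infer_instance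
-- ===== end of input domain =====

-- B replaces A's nested chunk loop (slice of 7, inner shift-down accumulator) by one flat
-- pass over enumerate(data) that appends a placeholder packing byte every 7th element and
-- ORs the high bit into that remembered position; objective: alternative decomposition.

-- ===== PORT A =====
-- Transliteration of A: outer loop over range(0, len(data), 7); chunk = data[i:i+7];
-- inner loop state (packing_byte, shift, data_bytes); shift is 7..1 here so '>> shift'
-- is exactly '>>> shift.toNat'.
def mopho_pack (data : List Int) : List Int :=
  (PySem.List.pyRange 0 (data.length : Int) 7).foldl
    (fun packed_data i =>
      let chunk := PySem.List.slice data (some i) (some (i + 7))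
      let st := chunk.foldl
        (fun (st : Int × Int × List Int) byte =>
          (PySem.Int.bor st.1 ((PySem.Int.band byte 128) >>> st.2.1.toNat),
           st.2.1 - 1,
           st.2.2 ++ [PySem.Int.band byte 127]))
        (0, 7, [])
      (packed_data ++ [st.1]) ++ st.2.2)
    []

-- ===== PORT B =====
-- Transliteration of B: one fold over enumerate(data); state = (packed, pack_pos);
-- pack_pos is always in range, so Python's 'packed[pack_pos]' is exactly 'getD _ 0'.
def mopho_pack_alt (data : List Int) : List Int :=
  ((PySem.List.enumerate data 0).foldl
    (fun (st : List Int × Nat) p =>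
      let st1 := if PySem.Int.mod p.1 7 = 0 then (st.1 ++ [(0 : Int)], st.1.length) else st
      let packed := st1.1.set st1.2
        (PySem.Int.bor (st1.1.getD st1.2 0)
          (((PySem.Int.band p.2 128) >>> (7 : Nat)) <<< (PySem.Int.mod p.1 7).toNat))
      (packed ++ [PySem.Int.band p.2 127], st1.2))
    ([], 0)).1

-- ===== PRECONDITION & SPEC =====
def Spec_mopho_pack (data : List Int) (out : List Int) : Prop := out = mopho_pack_alt data
instance (data : List Int) (out : List Int) : Decidable (Spec_mopho_pack data out) := by unfold Spec_mopho_pack; infer_instance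

-- ===== CLAIM (what is proved, stated in full; the proofs are below) =====
def Claim_equal_mopho_pack : Prop := ∀ (data : List Int), Dom_mopho_pack data → Spec_mopho_pack data (mopho_pack data)

-- ===== LEMMAS AND PROOFS =====

-- the low 7 bits of each byte
def pvMask (c : List Int) : List Int := c.map (fun b => PySem.Int.band b 127)

-- A's inner accumulator: OR in (byte & 0x80) >> s with s counting down
def packA : Int → Int → List Int → Int
  | p, _, [] => p
  | p, s, b :: c => packA (PySem.Int.bor p ((PySem.Int.band b 128) >>> s.toNat)) (s - 1) c

-- the common chunked description both ports are reduced to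
def pvSpec : List Int → List Int
  | [] => []
  | b :: rest =>
      packA 0 7 (b :: rest.take 6) ::
        ((PySem.Int.band b 127 :: pvMask (rest.take 6)) ++ pvSpec (rest.drop 6))
  termination_by l => l.length
  decreasing_by simp

theorem band128 (b : Int) : PySem.Int.band b 128 = 0 ∨ PySem.Int.band b 128 = 128 := by
  unfold PySem.Int.band
  split_ifs with h1 h2 h2 <;> try omega
  · have h : b.toNat &&& (128 : Nat) = (b.toNat.testBit 7).toNat * 2 ^ 7 := by
      have := Nat.and_two_pow b.toNat 7; simpa using this
    rw [show ((128 : Int).toNat = (128 : Nat)) from rfl, h]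
    rcases Nat.testBit b.toNat 7 <;> simp
  · have h : (128 : Nat) &&& (-b - 1).toNat = ((-b - 1).toNat.testBit 7).toNat * 2 ^ 7 := by
      have := Nat.and_two_pow (-b - 1).toNat 7; simpa [Nat.and_comm] using this
    rw [show ((128 : Int).toNat = (128 : Nat)) from rfl, h]
    rcases (-b - 1).toNat.testBit 7 <;> simp

theorem shift_eq (b : Int) (j : Nat) (hj : j ≤ 6) :
    ((PySem.Int.band b 128) >>> (7 : Nat)) <<< j = (PySem.Int.band b 128) >>> (7 - j) := by
  rcases band128 b with h | h <;> rw [h] <;> interval_cases j <;> decide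

theorem mod7 (n : Int) : PySem.Int.mod n 7 = n % 7 := by
  show n.fmod 7 = n % 7
  rw [Int.fmod_eq_emod]; simp

theorem pvSpec_nil : pvSpec [] = [] := by simp [pvSpec]

theorem pvSpec_cons (b : Int) (rest : List Int) :
    pvSpec (b :: rest)
      = packA 0 7 (b :: rest.take 6) ::
          ((PySem.Int.band b 127 :: pvMask (rest.take 6)) ++ pvSpec (rest.drop 6)) := by
  rw [pvSpec.eq_def]

theorem pyRange7_eq_nil (a b : Int) (h : b ≤ a) : PySem.List.pyRange a b 7 = [] := by
  rw [PySem.List.pyRange_of_pos a b (by norm_num)]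
  simp [show ¬ a < b by omega]

theorem pyRange7_cons (a b : Int) (h : a < b) :
    PySem.List.pyRange a b 7 = a :: PySem.List.pyRange (a + 7) b 7 := by
  rw [PySem.List.pyRange_of_pos a b (by norm_num), PySem.List.pyRange_of_pos (a + 7) b (by norm_num)]
  have hN : ((b - a + 7 - 1) / 7).toNat = (if a + 7 < b then ((b - (a + 7) + 7 - 1) / 7).toNat else 0) + 1 := by
    split_ifs <;> omega
  rw [if_pos h, hN, List.range_succ_eq_map, List.map_cons, List.map_map]
  refine List.cons_eq_cons.mpr ⟨by omega, List.map_congr_left ?_⟩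
  intro k _; simp [Function.comp]; ring

-- A's inner loop computes packA together with the masked bytes
theorem A_inner (c : List Int) : ∀ (p s : Int) (D : List Int),
    c.foldl
      (fun (st : Int × Int × List Int) byte =>
        (PySem.Int.bor st.1 ((PySem.Int.band byte 128) >>> st.2.1.toNat),
         st.2.1 - 1,
         st.2.2 ++ [PySem.Int.band byte 127]))
      (p, s, D)
    = (packA p s c, s - c.length, D ++ pvMask c) := by
  induction c with
  | nil => intro p s D; simp [packA, pvMask]
  | cons b c ih =>
      intro p s D
      rw [List.foldl_cons, ih]
      simp only [packA, pvMask, List.map_cons, Prod.mk.injEq, List.length_cons]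
      refine ⟨trivial, by push_cast; ring, by simp⟩

-- A's outer loop from chunk index k produces pvSpec of the remaining data
theorem A_outer (data : List Int) (k : Nat) (P : List Int) :
    (PySem.List.pyRange (k : Int) (data.length : Int) 7).foldl
      (fun packed_data i =>
        let chunk := PySem.List.slice data (some i) (some (i + 7))
        let st := chunk.foldl
          (fun (st : Int × Int × List Int) byte =>
            (PySem.Int.bor st.1 ((PySem.Int.band byte 128) >>> st.2.1.toNat),
             st.2.1 - 1,
             st.2.2 ++ [PySem.Int.band byte 127]))
          (0, 7, [])
        (packed_data ++ [st.1]) ++ st.2.2)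
      P
    = P ++ pvSpec (data.drop k) := by
  by_cases h : data.length ≤ k
  · rw [pyRange7_eq_nil _ _ (by exact_mod_cast h)]
    simp [List.drop_eq_nil_of_le h, pvSpec_nil]
  · rw [pyRange7_cons _ _ (by exact_mod_cast Nat.lt_of_not_le h)]
    rw [List.foldl_cons]
    simp only
    rw [show ((k : Int) + 7) = ((k + 7 : Nat) : Int) by push_cast; ring,
        PySem.List.slice_natCast, show k + 7 - k = 7 from by omega, A_inner]
    rw [A_outer data (k + 7) _]
    rcases hdk : data.drop k with _ | ⟨b, t⟩
    · exact absurd (List.drop_eq_nil_iff.mp hdk) h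
    · have h7 : data.drop (k + 7) = t.drop 6 := by
        have h' : List.drop 7 (List.drop k data) = List.drop (k + 7) data := List.drop_drop
        rw [← h', hdk]; rfl
      rw [h7, pvSpec_cons, show List.take 7 (b :: t) = b :: t.take 6 from rfl]
      simp [pvMask]
  termination_by data.length - k
  decreasing_by omega

-- B's flat pass, mid-chunk: position j ∈ [1,7), the packing byte sits at P.length
theorem B_inner (c : List Int) : ∀ (n : Int) (j : Nat) (P D : List Int) (pb : Int),
    0 ≤ n → PySem.Int.mod n 7 = (j : Int) → 1 ≤ j → j + c.length ≤ 7 →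
    (PySem.List.enumerate c n).foldl
      (fun (st : List Int × Nat) p =>
        let st1 := if PySem.Int.mod p.1 7 = 0 then (st.1 ++ [(0 : Int)], st.1.length) else st
        let packed := st1.1.set st1.2
          (PySem.Int.bor (st1.1.getD st1.2 0)
            (((PySem.Int.band p.2 128) >>> (7 : Nat)) <<< (PySem.Int.mod p.1 7).toNat))
        (packed ++ [PySem.Int.band p.2 127], st1.2))
      (P ++ pb :: D, P.length)
    = (P ++ packA pb (7 - (j : Int)) c :: (D ++ pvMask c), P.length) := by
  induction c with
  | nil => intro n j P D pb _ _ _ _; simp [packA, pvMask]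
  | cons b c ih =>
      intro n j P D pb hn hmod hj1 hj7
      have hj6 : j ≤ 6 := by simp at hj7; omega
      rw [PySem.List.enumerate_cons, List.foldl_cons]
      simp only
      rw [if_neg (by rw [hmod]; exact_mod_cast by omega), hmod]
      rw [show ((j : Int)).toNat = j from by simp]
      have hget : (P ++ pb :: D).getD P.length 0 = pb := by simp [List.getD]
      have hset : ∀ x : Int, (P ++ pb :: D).set P.length x = P ++ x :: D := by intro x; simp
      rw [hget, hset, shift_eq b j hj6]
      have happ : (P ++ (PySem.Int.bor pb (PySem.Int.band b 128 >>> (7 - j))) :: D) ++ [PySem.Int.band b 127]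
          = P ++ (PySem.Int.bor pb (PySem.Int.band b 128 >>> (7 - j))) :: (D ++ [PySem.Int.band b 127]) := by
        simp
      rw [happ]
      rcases c with _ | ⟨b', c'⟩
      · simp [packA, pvMask, show ((7 : Int) - (j : Int)).toNat = 7 - j from by omega]
      · have hlen : j + 1 ≤ 6 := by simp at hj7; omega
        rw [ih (n + 1) (j + 1) P (D ++ [PySem.Int.band b 127]) _
              (by omega)
              (by rw [mod7] at hmod ⊢; push_cast; omega)
              (by omega) (by simp at hj7 ⊢; omega)]
        simp only [packA, pvMask, List.map_cons]
        rw [show ((7 : Int) - (j : Int)).toNat = 7 - j from by omega,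
            show (7 : Int) - (j : Int) - 1 = 7 - ((j + 1 : Nat) : Int) by push_cast; ring]
        simp

-- B's flat pass from a chunk boundary (7 ∣ n) produces pvSpec
theorem B_outer (N : Nat) : ∀ (data : List Int), data.length ≤ N → ∀ (n : Int) (P : List Int) (pp : Nat),
    0 ≤ n → (7 : Int) ∣ n →
    ((PySem.List.enumerate data n).foldl
      (fun (st : List Int × Nat) p =>
        let st1 := if PySem.Int.mod p.1 7 = 0 then (st.1 ++ [(0 : Int)], st.1.length) else st
        let packed := st1.1.set st1.2
          (PySem.Int.bor (st1.1.getD st1.2 0)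
            (((PySem.Int.band p.2 128) >>> (7 : Nat)) <<< (PySem.Int.mod p.1 7).toNat))
        (packed ++ [PySem.Int.band p.2 127], st1.2))
      (P, pp)).1
    = P ++ pvSpec data := by
  induction N with
  | zero =>
      intro data hN n P pp hn hd
      have hd0 : data = [] := List.length_eq_zero_iff.mp (by omega)
      subst hd0
      simp [pvSpec_nil]
  | succ N ih =>
  intro data hN n P pp hn hd
  rcases data with _ | ⟨b, rest⟩
  · simp [pvSpec_nil]
  · have hmod0 : PySem.Int.mod n 7 = 0 := by rw [mod7]; omega
    rw [PySem.List.enumerate_cons, List.foldl_cons]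
    simp only
    rw [if_pos hmod0, hmod0]
    have hget : (P ++ [(0 : Int)]).getD P.length 0 = 0 := by simp [List.getD]
    have hset : ∀ x : Int, (P ++ [(0 : Int)]).set P.length x = P ++ [x] := by intro x; simp
    have hsh : ((PySem.Int.band b 128) >>> (7 : Nat)) <<< ((0 : Int)).toNat = PySem.Int.band b 128 >>> (7 : Nat) := by
      simp
    rw [hget, hset, hsh]
    set x : Int := PySem.Int.bor 0 (PySem.Int.band b 128 >>> (7 : Nat)) with hx
    have hsplit : PySem.List.enumerate rest (n + 1)
        = PySem.List.enumerate (rest.take 6) (n + 1)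
          ++ PySem.List.enumerate (rest.drop 6) (n + 1 + (rest.take 6).length) := by
      conv_lhs => rw [← List.take_append_drop 6 rest]
      rw [PySem.List.enumerate_append]
    have happ : (P ++ [x]) ++ [PySem.Int.band b 127] = P ++ x :: [PySem.Int.band b 127] := by simp
    rw [happ, hsplit, List.foldl_append]
    rw [B_inner (rest.take 6) (n + 1) 1 P [PySem.Int.band b 127] x
          (by omega) (by rw [mod7]; omega) (by omega)
          (by have := List.length_take_le 6 rest; omega)]
    by_cases hr : rest.length ≤ 6
    · rw [List.drop_eq_nil_of_le hr]
      simp [pvSpec, packA, pvMask, List.drop_eq_nil_of_le hr, hx]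
    · have htl : (rest.take 6).length = 6 := by rw [List.length_take]; omega
      rw [ih (rest.drop 6) (by simp at hN ⊢; omega) (n + 1 + (rest.take 6).length)
            (P ++ packA x (7 - ((1 : Nat) : Int)) (rest.take 6) :: ([PySem.Int.band b 127] ++ pvMask (rest.take 6)))
            P.length
            (by omega) (by rw [htl]; push_cast; omega)]
      rw [pvSpec_cons]
      simp [packA, pvMask, hx]

theorem A_eq_spec (data : List Int) : mopho_pack data = pvSpec data := by
  unfold mopho_pack
  have h := A_outer data 0 []
  simpa using h

theorem B_eq_spec (data : List Int) : mopho_pack_alt data = pvSpec data := by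
  unfold mopho_pack_alt
  have h := B_outer data.length data (le_refl _) 0 [] 0 (by omega) ⟨0, by ring⟩
  simpa using h

-- ===== VERDICT (by name: the statement is the Claim_ definition above) =====
theorem mopho_pack_spec : Claim_equal_mopho_pack := by
  intro data _
  unfold Spec_mopho_pack
  rw [A_eq_spec, B_eq_spec]
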